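-- pv_equiv track=rewrite | github.com/keras-team/keras | keras_core/operations/numpy.py | shape_equal
-- ===== SOURCE A (Python) =====
-- def shape_equal(shape1, shape2, axis=None, allow_none=True):
--     """Check if two shapes are equal.
--
--     Args:
--         shape1: A tuple or list of integers.
--         shape2: A tuple or list of integers.
--         axis: int or list/tuple of ints, defaults to None. If specified, the
--             shape check will ignore the axes specified by `axis`.
--         allow_none: bool, defaults to True. If True, None in the shape will
--             match any value.
--     """
--     if len(shape1) != len(shape2):
--         return False
--     shape1 = list(shape1)
--     shape2 = list(shape2)
--     if axis is not None:
--         for ax in axis: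
--             shape1[ax] = -1
--             shape2[ax] = -1
--     if allow_none:
--         for i in range(len(shape1)):
--             if shape1[i] is None:
--                 shape1[i] = shape2[i]
--             if shape2[i] is None:
--                 shape2[i] = shape1[i]
--
--     return shape1 == shape2
-- ===== SOURCE B (Python) =====
-- def shape_equal(shape1, shape2, axis=None, allow_none=True):
--     if len(shape1) != len(shape2):
--         return False
--     n = len(shape1)
--     masked = set()
--     if axis is not None:
--         for ax in axis:
--             masked.add(ax + n if ax < 0 else ax)
--     for i, (a, b) in enumerate(zip(shape1, shape2)):
--         if i in masked:
--             continue
--         if allow_none and (a is None or b is None):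
--             continue
--         if a != b:
--             return False
--     return True
-- ===== Notes on version B (the rewrite author's own statement) =====
-- stated objective: simpler
-- what changed: Replaces A's two mutate-both-lists passes (masking both lists with -1, then filling None slots) plus a whole-list == comparison by building a set of normalized masked axes once and doing a single short-circuiting element-wise pass that skips masked axes and None matches.
-- outside the precondition, e.g. on shape_equal([1, 2], [1, 2], [5], True): A raises IndexError, B returns True
import Mathlib
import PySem

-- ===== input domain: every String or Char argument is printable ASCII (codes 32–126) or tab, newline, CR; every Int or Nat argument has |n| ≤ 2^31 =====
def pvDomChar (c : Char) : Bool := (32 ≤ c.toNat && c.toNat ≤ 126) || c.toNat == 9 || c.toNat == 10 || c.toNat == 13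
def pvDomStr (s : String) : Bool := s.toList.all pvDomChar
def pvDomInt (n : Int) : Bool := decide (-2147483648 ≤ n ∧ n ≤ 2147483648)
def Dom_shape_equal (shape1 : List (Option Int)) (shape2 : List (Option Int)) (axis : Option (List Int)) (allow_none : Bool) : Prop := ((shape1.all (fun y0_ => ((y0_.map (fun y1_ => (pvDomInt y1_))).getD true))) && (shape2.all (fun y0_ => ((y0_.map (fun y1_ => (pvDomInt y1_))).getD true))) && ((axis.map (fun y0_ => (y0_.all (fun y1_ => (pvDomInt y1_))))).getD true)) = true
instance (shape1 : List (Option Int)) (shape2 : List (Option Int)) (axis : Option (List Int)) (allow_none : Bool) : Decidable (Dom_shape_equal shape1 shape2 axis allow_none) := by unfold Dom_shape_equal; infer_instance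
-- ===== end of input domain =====

-- B replaces A's two mutate-both-lists passes plus whole-list == by a normalized masked-axis set
-- and one short-circuiting element-wise pass (objective: simpler; same O(n+|axis|) cost).

-- ===== PORT A =====
def shape_equal (shape1 : List (Option Int)) (shape2 : List (Option Int)) (axis : Option (List Int)) (allow_none : Bool) : Bool :=
  if shape1.length ≠ shape2.length then false
  else
    let p : List (Option Int) × List (Option Int) :=
      match axis with
      | none => (shape1, shape2)
      | some l =>
        l.foldl (fun (p : List (Option Int) × List (Option Int)) ax =>
          (PySem.List.pySetD p.1 ax (some (-1)), PySem.List.pySetD p.2 ax (some (-1)))) (shape1, shape2)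
    let q : List (Option Int) × List (Option Int) :=
      if allow_none then
        (PySem.List.pyRange 0 (p.1.length : Int) 1).foldl
          (fun (p : List (Option Int) × List (Option Int)) i =>
            let s1 := if PySem.List.pyGetD p.1 i none = none
                      then PySem.List.pySetD p.1 i (PySem.List.pyGetD p.2 i none) else p.1
            let s2 := if PySem.List.pyGetD p.2 i none = none
                      then PySem.List.pySetD p.2 i (PySem.List.pyGetD s1 i none) else p.2
            (s1, s2)) p
      else p
    q.1 == q.2

-- ===== PORT B =====
-- the single element-wise pass of Source B (enumerate(zip(...)) with continue/early return)
def pvAltGo (masked : PySem.Set Int) (allow_none : Bool) : Int → List (Option Int) → List (Option Int) → Bool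
  | _, [], _ => true
  | _, _ :: _, [] => true
  | i, a :: s1, b :: s2 =>
    if PySem.Set.contains masked i then pvAltGo masked allow_none (i + 1) s1 s2
    else if allow_none && (a == none || b == none) then pvAltGo masked allow_none (i + 1) s1 s2
    else if a != b then false
    else pvAltGo masked allow_none (i + 1) s1 s2

def shape_equal_alt (shape1 : List (Option Int)) (shape2 : List (Option Int)) (axis : Option (List Int)) (allow_none : Bool) : Bool :=
  if shape1.length ≠ shape2.length then false
  else
    let n : Int := shape1.length
    let masked : PySem.Set Int :=
      match axis with
      | none => PySem.Set.empty
      | some l => l.foldl (fun s ax => PySem.Set.add s (if ax < 0 then ax + n else ax)) PySem.Set.empty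
    pvAltGo masked allow_none 0 shape1 shape2

-- ===== PRECONDITION & SPEC =====
-- Pre_ excludes exactly the inputs where A raises IndexError: an axis entry out of range
-- [-len, len) when the two shapes have equal length (with unequal lengths A returns False first).
def Pre_shape_equal (shape1 : List (Option Int)) (shape2 : List (Option Int)) (axis : Option (List Int)) (allow_none : Bool) : Prop :=
  shape1.length = shape2.length → ∀ l, axis = some l → ∀ ax ∈ l, PySem.Raise.InRange shape1.length ax
instance (shape1 : List (Option Int)) (shape2 : List (Option Int)) (axis : Option (List Int)) (allow_none : Bool) : Decidable (Pre_shape_equal shape1 shape2 axis allow_none) := by unfold Pre_shape_equal; infer_instance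

def pvWitness_shape_equal : List (Option Int) × List (Option Int) × Option (List Int) × Bool :=
  ([some 1, none, some 3], [some 1, some 2, some 7], some [-1, 0], true)

def Spec_shape_equal (shape1 : List (Option Int)) (shape2 : List (Option Int)) (axis : Option (List Int)) (allow_none : Bool) (out : Bool) : Prop := out = shape_equal_alt shape1 shape2 axis allow_none
instance (shape1 : List (Option Int)) (shape2 : List (Option Int)) (axis : Option (List Int)) (allow_none : Bool) (out : Bool) : Decidable (Spec_shape_equal shape1 shape2 axis allow_none out) := by unfold Spec_shape_equal; infer_instance

-- ===== CLAIM (what is proved, stated in full; the proofs are below) =====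
def Claim_equal_shape_equal : Prop := ∀ (shape1 : List (Option Int)) (shape2 : List (Option Int)) (axis : Option (List Int)) (allow_none : Bool), Dom_shape_equal shape1 shape2 axis allow_none → Pre_shape_equal shape1 shape2 axis allow_none → Spec_shape_equal shape1 shape2 axis allow_none (shape_equal shape1 shape2 axis allow_none)

-- ===== LEMMAS AND PROOFS =====

-- the value shape1[i] (resp. shape2[i]) holds after A's allow_none pass
def pvF (a b : Option Int) : Option Int := if a = none then b else a
def pvG (a b : Option Int) : Option Int := if b = none then pvF a b else b

-- A's allow_none loop body, named for the proofs (syntactically the lambda in the port)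
def pvStep (p : List (Option Int) × List (Option Int)) (i : Int) : List (Option Int) × List (Option Int) :=
  let s1 := if PySem.List.pyGetD p.1 i none = none
            then PySem.List.pySetD p.1 i (PySem.List.pyGetD p.2 i none) else p.1
  let s2 := if PySem.List.pyGetD p.2 i none = none
            then PySem.List.pySetD p.2 i (PySem.List.pyGetD s1 i none) else p.2
  (s1, s2)

theorem pv_getD_set_self {α : Type} (l : List α) (k : Nat) (v d : α) (h : k < l.length) :
    (l.set k v).getD k d = v := by
  simp [List.getD, h]

theorem pv_getD_set_ne {α : Type} (l : List α) (k j : Nat) (v d : α) (h : k ≠ j) :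
    (l.set k v).getD j d = l.getD j d := by
  simp [List.getD, List.getElem?_set_ne h]

-- pySetD at an in-range (possibly negative) index is List.set at the normalized index
theorem pv_pySetD_inrange {α : Type} (s : List α) (ax : Int) (v : α)
    (h1 : -(s.length : Int) ≤ ax) (h2 : ax < (s.length : Int)) :
    PySem.List.pySetD s ax v = s.set (if ax < 0 then ax + s.length else ax).toNat v := by
  simp only [PySem.List.pySetD, PySem.List.pySet?, PySem.List.pyIdx?]
  by_cases hax : 0 ≤ ax
  · rw [if_pos hax, if_pos h2]
    simp [not_lt.mpr hax]
  · rw [if_neg hax, if_pos h1]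
    simp only [Option.map_some, Option.getD_some]
    congr 1
    rw [if_pos (by omega : ax < 0)]
    omega

def pvNorm (n : Nat) (ax : Int) : Nat := (if ax < 0 then ax + n else ax).toNat

theorem pv_norm_cast (n : Nat) (ax : Int) (h : PySem.Raise.InRange n ax) :
    ((pvNorm n ax : Nat) : Int) = (if ax < 0 then ax + n else ax) := by
  obtain ⟨h1, h2⟩ := h
  unfold pvNorm
  split <;> omega

theorem pv_norm_lt (n : Nat) (ax : Int) (h : PySem.Raise.InRange n ax) : pvNorm n ax < n := by
  obtain ⟨h1, h2⟩ := h
  unfold pvNorm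
  split <;> omega

-- characterization of A's masking fold (on one list)
theorem pv_mask_char (l : List Int) (v : Option Int) :
    ∀ (s : List (Option Int)), (∀ ax ∈ l, PySem.Raise.InRange s.length ax) →
    ((l.foldl (fun s ax => PySem.List.pySetD s ax v) s).length = s.length ∧
     ∀ j : Nat, j < s.length →
       (l.foldl (fun s ax => PySem.List.pySetD s ax v) s).getD j none =
         (if l.any (fun ax => pvNorm s.length ax == j) then v else s.getD j none)) := by
  induction l with
  | nil => intro s _; simp
  | cons ax l ih =>
    intro s hrng
    have hx := hrng ax (by simp)
    have hset : PySem.List.pySetD s ax v = s.set (pvNorm s.length ax) v := by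
      rw [pv_pySetD_inrange s ax v hx.1 hx.2]; rfl
    have hlen : (s.set (pvNorm s.length ax) v).length = s.length := by simp
    have hnorm_lt : pvNorm s.length ax < s.length := pv_norm_lt _ _ hx
    have ih' := ih (s.set (pvNorm s.length ax) v) (by
      intro a ha; rw [hlen]; exact hrng a (by simp [ha]))
    rw [List.foldl_cons, hset]
    obtain ⟨ihl, ihg⟩ := ih'
    refine ⟨by rw [ihl, hlen], ?_⟩
    intro j hj
    rw [ihg j (by omega), hlen]
    by_cases hmem : l.any (fun a => pvNorm s.length a == j)
    · rw [if_pos hmem, if_pos (by simp_all)]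
    · rw [if_neg hmem]
      by_cases hax : pvNorm s.length ax = j
      · rw [if_pos (by simp [hax]), ← hax, pv_getD_set_self _ _ _ _ hnorm_lt]
      · rw [if_neg (by simp_all), pv_getD_set_ne _ _ _ _ _ hax]

-- characterization of A's allow_none pass
theorem pv_pass_char (m : Nat) :
    ∀ (k : Nat) (x y : List (Option Int)), x.length = k + m → y.length = k + m →
    (((PySem.List.pyRange (k : Int) ((k + m : Nat) : Int) 1).foldl pvStep (x, y)).1.length = k + m ∧
     ((PySem.List.pyRange (k : Int) ((k + m : Nat) : Int) 1).foldl pvStep (x, y)).2.length = k + m ∧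
     ∀ j : Nat, j < k + m →
       ((PySem.List.pyRange (k : Int) ((k + m : Nat) : Int) 1).foldl pvStep (x, y)).1.getD j none =
         (if j < k then x.getD j none else pvF (x.getD j none) (y.getD j none)) ∧
       ((PySem.List.pyRange (k : Int) ((k + m : Nat) : Int) 1).foldl pvStep (x, y)).2.getD j none =
         (if j < k then y.getD j none else pvG (x.getD j none) (y.getD j none))) := by
  induction m with
  | zero =>
    intro k x y hx hy
    rw [PySem.List.pyRange_one_eq_nil (by push_cast; omega)]
    refine ⟨by simpa using hx, by simpa using hy, ?_⟩
    intro j hj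
    simp only [List.foldl_nil]
    rw [if_pos (by omega), if_pos (by omega)]
    exact ⟨rfl, rfl⟩
  | succ m ih =>
    intro k x y hx hy
    have hklt : (k : Int) < ((k + (m + 1) : Nat) : Int) := by push_cast; omega
    rw [PySem.List.pyRange_one_cons hklt, List.foldl_cons]
    have hkx : k < x.length := by omega
    have hky : k < y.length := by omega
    -- the state after processing index k
    set x' : List (Option Int) :=
      if x.getD k none = none then x.set k (y.getD k none) else x with hx'def
    have hx'k : x'.getD k none = pvF (x.getD k none) (y.getD k none) := by
      rw [hx'def]; unfold pvF
      by_cases h : x.getD k none = none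
      · rw [if_pos h, if_pos h, pv_getD_set_self _ _ _ _ hkx]
      · rw [if_neg h, if_neg h]
    set y' : List (Option Int) :=
      if y.getD k none = none then y.set k (x'.getD k none) else y with hy'def
    have hy'k : y'.getD k none = pvG (x.getD k none) (y.getD k none) := by
      rw [hy'def]; unfold pvG
      by_cases h : y.getD k none = none
      · rw [if_pos h, if_pos h, pv_getD_set_self _ _ _ _ hky, hx'k]
      · rw [if_neg h, if_neg h]
    have hstep : pvStep (x, y) (k : Int) = (x', y') := by
      simp only [pvStep, PySem.List.pyGetD_natCast, PySem.List.pySetD_natCast, hx'def, hy'def]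
    have hx'len : x'.length = (k + 1) + m := by
      rw [hx'def]; split
      · simp only [List.length_set]; omega
      · omega
    have hy'len : y'.length = (k + 1) + m := by
      rw [hy'def]; split
      · simp only [List.length_set]; omega
      · omega
    have hx'ne : ∀ j : Nat, j ≠ k → x'.getD j none = x.getD j none := by
      intro j hj; rw [hx'def]; split
      · exact pv_getD_set_ne _ _ _ _ _ (fun h => hj h.symm)
      · rfl
    have hy'ne : ∀ j : Nat, j ≠ k → y'.getD j none = y.getD j none := by
      intro j hj; rw [hy'def]; split
      · exact pv_getD_set_ne _ _ _ _ _ (fun h => hj h.symm)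
      · rfl
    have hcast1 : (k : Int) + 1 = ((k + 1 : Nat) : Int) := by push_cast; ring
    have hcast2 : ((k + (m + 1) : Nat) : Int) = (((k + 1) + m : Nat) : Int) := by push_cast; ring
    rw [hstep, hcast1, hcast2]
    obtain ⟨ih1, ih2, ih3⟩ := ih (k + 1) x' y' hx'len hy'len
    refine ⟨ih1.trans (by omega), ih2.trans (by omega), ?_⟩
    intro j hj
    obtain ⟨e1, e2⟩ := ih3 j (by omega)
    refine ⟨?_, ?_⟩
    · rw [e1]
      rcases lt_trichotomy j k with h | h | h
      · rw [if_pos (by omega : j < k + 1), if_pos h]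
        exact hx'ne j (by omega)
      · subst h
        rw [if_pos (by omega : j < j + 1), if_neg (by omega : ¬ j < j)]
        exact hx'k
      · rw [if_neg (by omega : ¬ j < k + 1), if_neg (by omega : ¬ j < k),
          hx'ne j (by omega), hy'ne j (by omega)]
    · rw [e2]
      rcases lt_trichotomy j k with h | h | h
      · rw [if_pos (by omega : j < k + 1), if_pos h]
        exact hy'ne j (by omega)
      · subst h
        rw [if_pos (by omega : j < j + 1), if_neg (by omega : ¬ j < j)]
        exact hy'k
      · rw [if_neg (by omega : ¬ j < k + 1), if_neg (by omega : ¬ j < k),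
          hx'ne j (by omega), hy'ne j (by omega)]

-- A's allow_none pass from the start, in the form the final proof uses
theorem pv_pass_char0 (n : Nat) (x y : List (Option Int)) (hx : x.length = n) (hy : y.length = n) :
    (((PySem.List.pyRange 0 (n : Int) 1).foldl pvStep (x, y)).1.length = n ∧
     ((PySem.List.pyRange 0 (n : Int) 1).foldl pvStep (x, y)).2.length = n ∧
     ∀ j : Nat, j < n →
       ((PySem.List.pyRange 0 (n : Int) 1).foldl pvStep (x, y)).1.getD j none =
         pvF (x.getD j none) (y.getD j none) ∧
       ((PySem.List.pyRange 0 (n : Int) 1).foldl pvStep (x, y)).2.getD j none =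
         pvG (x.getD j none) (y.getD j none)) := by
  have h := pv_pass_char n 0 x y (by omega) (by omega)
  simp only [Nat.cast_zero, Nat.zero_add, Nat.not_lt_zero, if_false] at h
  exact h

-- membership in B's masked set
theorem pv_masked_mem (f : Int → Int) (l : List Int) :
    ∀ (s0 : PySem.Set Int) (x : Int),
      x ∈ l.foldl (fun s ax => PySem.Set.add s (f ax)) s0 ↔ x ∈ s0 ∨ ∃ ax ∈ l, f ax = x := by
  induction l with
  | nil => intro s0 x; simp
  | cons a l ih =>
    intro s0 x
    rw [List.foldl_cons, ih, PySem.Set.mem_add]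
    simp only [List.mem_cons]
    constructor
    · rintro ((h | h) | ⟨ax, ha, he⟩)
      · exact Or.inl h
      · exact Or.inr ⟨a, Or.inl rfl, h.symm⟩
      · exact Or.inr ⟨ax, Or.inr ha, he⟩
    · rintro (h | ⟨ax, (rfl | ha), he⟩)
      · exact Or.inl (Or.inl h)
      · exact Or.inl (Or.inr he.symm)
      · exact Or.inr ⟨ax, ha, he⟩

-- characterization of B's single pass
theorem pv_altGo_char (masked : PySem.Set Int) (an : Bool) :
    ∀ (x y : List (Option Int)) (i : Int), x.length = y.length →
    (pvAltGo masked an i x y = true ↔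
      ∀ j : Nat, j < x.length →
        PySem.Set.contains masked (i + j) = true ∨
        (an = true ∧ (x.getD j none = none ∨ y.getD j none = none)) ∨
        x.getD j none = y.getD j none) := by
  intro x
  induction x with
  | nil => intro y i _; simp [pvAltGo]
  | cons a s1 ih =>
    intro y i hlen
    cases y with
    | nil => simp at hlen
    | cons b s2 =>
      have hlen' : s1.length = s2.length := by simpa using hlen
      have hsplit : pvAltGo masked an i (a :: s1) (b :: s2) = true ↔
          ((PySem.Set.contains masked i = true ∨ (an = true ∧ (a = none ∨ b = none)) ∨ a = b) ∧
            pvAltGo masked an (i + 1) s1 s2 = true) := by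
        simp only [pvAltGo]
        split_ifs with h1 h2 h3
        · exact ⟨fun h => ⟨Or.inl h1, h⟩, fun h => h.2⟩
        · constructor
          · intro h
            refine ⟨Or.inr (Or.inl ?_), h⟩
            simpa using h2
          · exact fun h => h.2
        · have hne : a ≠ b := by simpa using h3
          constructor
          · intro h; simp at h
          · rintro ⟨(hc | hc | hc), _⟩
            · exact absurd hc h1
            · exact absurd hc (by simpa using h2)
            · exact absurd hc hne
        · have heq : a = b := by simpa using h3
          exact ⟨fun h => ⟨Or.inr (Or.inr heq), h⟩, fun h => h.2⟩
      rw [hsplit, ih s2 (i + 1) hlen']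
      constructor
      · rintro ⟨h0, hrest⟩ j hj
        cases j with
        | zero => simpa using h0
        | succ j =>
          have := hrest j (by simpa using hj)
          have hc : i + ((j + 1 : Nat) : Int) = (i + 1) + (j : Nat) := by push_cast; ring
          rw [hc]
          simpa using this
      · intro h
        refine ⟨by simpa using h 0 (by simp), ?_⟩
        intro j hj
        have := h (j + 1) (by simpa using Nat.succ_lt_succ hj)
        have hc : i + ((j + 1 : Nat) : Int) = (i + 1) + (j : Nat) := by push_cast; ring
        rw [hc] at this
        simpa using this

theorem pv_F_eq_G (a b : Option Int) : (pvF a b = pvG a b) ↔ (a = none ∨ b = none ∨ a = b) := by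
  rcases a with _ | av <;> rcases b with _ | bv <;> simp [pvF, pvG]

-- lists of equal length are equal iff they agree under getD at every index
theorem pv_eq_iff_getD {α : Type} (x y : List α) (d : α) (h : x.length = y.length) :
    x = y ↔ ∀ j : Nat, j < x.length → x.getD j d = y.getD j d := by
  constructor
  · intro he j _; rw [he]
  · intro hg
    apply List.ext_getElem h
    intro j h1 h2
    have := hg j h1
    rwa [List.getD_eq_getElem x d h1, List.getD_eq_getElem y d h2] at this

-- the common core: A's tail computation on masked lists equals B's single pass
theorem pv_core (n : Nat) (s1 s2 t1 t2 : List (Option Int)) (masked : PySem.Set Int) (an : Bool)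
    (hs1 : s1.length = n) (hs2 : s2.length = n) (ht1 : t1.length = n) (ht2 : t2.length = n)
    (M : Nat → Bool)
    (hchar1 : ∀ j : Nat, j < n → t1.getD j none = (if M j then some (-1) else s1.getD j none))
    (hchar2 : ∀ j : Nat, j < n → t2.getD j none = (if M j then some (-1) else s2.getD j none))
    (hmask : ∀ j : Nat, j < n → (PySem.Set.contains masked ((0 : Int) + (j : Nat)) = true ↔ M j = true)) :
    ((if an then
        (PySem.List.pyRange 0 (t1.length : Int) 1).foldl pvStep (t1, t2)
      else (t1, t2)).1 ==
     (if an then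
        (PySem.List.pyRange 0 (t1.length : Int) 1).foldl pvStep (t1, t2)
      else (t1, t2)).2) = pvAltGo masked an 0 s1 s2 := by
  rw [Bool.eq_iff_iff, beq_iff_eq,
    pv_altGo_char masked an s1 s2 0 (by omega)]
  cases an with
  | true =>
    simp only [reduceIte]
    rw [ht1]
    obtain ⟨h1, h2, h3⟩ := pv_pass_char0 n t1 t2 (by omega) (by omega)
    rw [pv_eq_iff_getD _ _ none (by omega), h1, hs1]
    constructor
    · intro h j hj
      have := h j hj
      obtain ⟨e1, e2⟩ := h3 j hj
      rw [e1, e2, pv_F_eq_G, hchar1 j hj, hchar2 j hj] at this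
      rw [hmask j hj]
      by_cases hm : M j = true
      · exact Or.inl hm
      · rw [if_neg hm, if_neg hm] at this
        rcases this with h | h | h
        · exact Or.inr (Or.inl ⟨by trivial, Or.inl h⟩)
        · exact Or.inr (Or.inl ⟨by trivial, Or.inr h⟩)
        · exact Or.inr (Or.inr h)
    · intro h j hj
      obtain ⟨e1, e2⟩ := h3 j hj
      rw [e1, e2, pv_F_eq_G, hchar1 j hj, hchar2 j hj]
      have := h j hj
      rw [hmask j hj] at this
      by_cases hm : M j = true
      · rw [if_pos hm, if_pos hm]
        exact Or.inr (Or.inr rfl)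
      · rw [if_neg hm, if_neg hm]
        rcases this with h' | ⟨_, h'⟩ | h'
        · exact absurd h' hm
        · rcases h' with h' | h'
          · exact Or.inl h'
          · exact Or.inr (Or.inl h')
        · exact Or.inr (Or.inr h')
  | false =>
    show t1 = t2 ↔ _
    rw [pv_eq_iff_getD _ _ none (by omega), ht1, hs1]
    constructor
    · intro h j hj
      have := h j hj
      rw [hchar1 j hj, hchar2 j hj] at this
      rw [hmask j hj]
      by_cases hm : M j = true
      · exact Or.inl hm
      · rw [if_neg hm, if_neg hm] at this
        exact Or.inr (Or.inr this)
    · intro h j hj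
      rw [hchar1 j hj, hchar2 j hj]
      have := h j hj
      rw [hmask j hj] at this
      by_cases hm : M j = true
      · rw [if_pos hm, if_pos hm]
      · rw [if_neg hm, if_neg hm]
        rcases this with h' | ⟨h', _⟩ | h'
        · exact absurd h' hm
        · exact absurd h' (by simp)
        · exact h'

-- ===== VERDICT (by name: the statement is the Claim_ definition above) =====
theorem shape_equal_spec : Claim_equal_shape_equal := by
  intro shape1 shape2 axis allow_none _ hpre
  unfold Spec_shape_equal shape_equal shape_equal_alt
  by_cases hlen : shape1.length = shape2.length
  · rw [if_neg (by simpa using hlen), if_neg (by simpa using hlen)]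
    rcases axis with _ | l
    · exact pv_core shape1.length shape1 shape2 shape1 shape2 PySem.Set.empty allow_none
        rfl hlen.symm rfl hlen.symm (fun _ => false)
        (fun j hj => by simp) (fun j hj => by simp)
        (fun j hj => by simp [PySem.Set.contains, PySem.Set.empty])
    · have hrng : ∀ ax ∈ l, PySem.Raise.InRange shape1.length ax := hpre hlen l rfl
      have hrng2 : ∀ ax ∈ l, PySem.Raise.InRange shape2.length ax := by
        rw [← hlen]; exact hrng
      obtain ⟨hl1, hc1⟩ := pv_mask_char l (some (-1)) shape1 hrng
      obtain ⟨hl2, hc2⟩ := pv_mask_char l (some (-1)) shape2 hrng2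
      have hsplitfold :
          l.foldl (fun (p : List (Option Int) × List (Option Int)) ax =>
              (PySem.List.pySetD p.1 ax (some (-1)), PySem.List.pySetD p.2 ax (some (-1)))) (shape1, shape2)
            = (l.foldl (fun s ax => PySem.List.pySetD s ax (some (-1))) shape1,
               l.foldl (fun s ax => PySem.List.pySetD s ax (some (-1))) shape2) := by
        rw [PySem.List.foldl_prod_mk (f := fun s ax => PySem.List.pySetD s ax (some (-1)))
          (g := fun s ax => PySem.List.pySetD s ax (some (-1)))]
      simp only [hsplitfold]
      refine pv_core shape1.length shape1 shape2
        (l.foldl (fun s ax => PySem.List.pySetD s ax (some (-1))) shape1)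
        (l.foldl (fun s ax => PySem.List.pySetD s ax (some (-1))) shape2)
        (l.foldl (fun s ax => PySem.Set.add s (if ax < 0 then ax + (shape1.length : Int) else ax)) PySem.Set.empty)
        allow_none rfl hlen.symm hl1 (hl2.trans hlen.symm)
        (fun j => l.any (fun ax => pvNorm shape1.length ax == j))
        hc1 ?_ ?_
      · intro j hj
        have := hc2 j (by omega)
        rw [← hlen] at this
        exact this
      · intro j hj
        rw [show ((0 : Int) + (j : Nat)) = (j : Int) by ring]
        simp only [PySem.Set.contains]
        rw [List.contains_iff_mem, pv_masked_mem]
        simp only [PySem.Set.empty, List.not_mem_nil, false_or, List.any_eq_true, beq_iff_eq]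
        constructor
        · rintro ⟨ax, ha, he⟩
          refine ⟨ax, ha, ?_⟩
          have hcast := pv_norm_cast shape1.length ax (hrng ax ha)
          omega
        · rintro ⟨ax, ha, he⟩
          refine ⟨ax, ha, ?_⟩
          have hcast := pv_norm_cast shape1.length ax (hrng ax ha)
          omega
  · rw [if_pos (by simpa using hlen), if_pos (by simpa using hlen)]
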